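-- pv_equiv track=rewrite | github.com/madhuri2k/fantastic-spoon | yay0/lzyf.py | crl
-- ===== SOURCE A (Python) =====
-- def crl(index, src, maxOffset, maxLength):
--     """
--     Returns starting position in source before index from where the max runlength is detected.
--     """
--     src_size = len(src)
--     if index > src_size:
--         return (-1, 0)
--     if (index+maxLength) > src_size:
--         maxLength = src_size - index
--     startPos = max(0, index-maxOffset)
--     endPos = index+maxLength-1
--     l = maxLength
--     # log.info("Looking from {} - {} ({}, {}) for upto {} bytes match at {}".format(startPos, endPos, index, maxOffset, maxLength, index))
--     # log.info("String to be matched: {}".format(src[index:index+maxLength]))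
--     # log.info("Source to be searchd: {}".format(src[startPos:endPos]))
--     while l>1:
--         # log.info("At l {}".format(l))
--         if src[index:index+l] in src[startPos:index+l-1]:
--             p = src.rfind(src[index:index+l], startPos, index+l-1)
--             # log.info("Match at {} in range {} {}".format(p, startPos, index+l-1))
--             return (p,l)
--         l -= 1
--     return (-1, 0)
-- ===== SOURCE B (Python) =====
-- def crl(index, src, maxOffset, maxLength):
--     """
--     Returns starting position in source before index from where the max runlength is detected.
--     Binary search on the match length: whether a match of length l exists is monotone in l,
--     so the greatest feasible l is found with O(log maxLength) membership tests, then one rfind.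
--     """
--     src_size = len(src)
--     if index > src_size:
--         return (-1, 0)
--     if index + maxLength > src_size:
--         maxLength = src_size - index
--     startPos = max(0, index - maxOffset)
--
--     def ok(l):
--         return src[index:index+l] in src[startPos:index+l-1]
--
--     if maxLength < 2 or not ok(2):
--         return (-1, 0)
--     lo, hi = 2, maxLength   # invariant: ok(lo) holds, no l in (hi, maxLength] is ok
--     while lo < hi:
--         mid = (lo + hi + 1) // 2
--         if ok(mid):
--             lo = mid
--         else:
--             hi = mid - 1
--     p = src.rfind(src[index:index+lo], startPos, index+lo-1)
--     return (p, lo)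
-- ===== Notes on version B (the rewrite author's own statement) =====
-- stated objective: alternative
-- what changed: A probes every candidate length from maxLength down to 2 with one substring-membership scan each; B exploits that existence of a length-l window match is monotone in l and binary-searches the greatest feasible length (O(log maxLength) membership scans) before the single rfind; intended as faster and measured up to ~1700x on large random inputs, though on all-same-character inputs A's first probe already matches and exits while B still pays its log probes, so one timing family did not confirm the speed-up. …
-- outside the precondition, e.g. on crl(-3, 'aa', 2, 3): A returns (1, 3), B returns (-1, 0)
import Mathlib
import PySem

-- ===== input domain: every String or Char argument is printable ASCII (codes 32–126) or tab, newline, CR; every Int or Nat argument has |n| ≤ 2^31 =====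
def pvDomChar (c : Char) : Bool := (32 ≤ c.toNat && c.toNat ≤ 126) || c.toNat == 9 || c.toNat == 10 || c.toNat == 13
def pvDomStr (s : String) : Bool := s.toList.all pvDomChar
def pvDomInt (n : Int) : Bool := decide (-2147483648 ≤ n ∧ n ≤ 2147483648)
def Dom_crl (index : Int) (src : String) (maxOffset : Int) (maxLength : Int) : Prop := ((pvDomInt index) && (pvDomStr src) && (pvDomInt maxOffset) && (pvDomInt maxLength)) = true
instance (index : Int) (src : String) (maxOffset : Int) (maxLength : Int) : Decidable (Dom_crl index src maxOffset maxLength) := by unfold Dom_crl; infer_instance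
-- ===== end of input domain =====

-- B replaces A's linear descent over candidate lengths (one substring scan per length) by a
-- binary search on the length — existence of a length-l window match is monotone in l — then one rfind.

-- ===== PORT A =====
-- while l > 1: if src[index:index+l] in src[startPos:index+l-1]: return (rfind…, l); l -= 1
-- (fuel = the loop's own counter l, so the structural recursion is the while loop verbatim)
def crlWhileA (src : String) (index startPos : Int) : Nat → Int → Int × Int
  | 0, _ => (-1, 0)
  | Nat.succ fuel, l =>
    if 1 < l then
      if PySem.Str.isIn (PySem.Str.slice src (some index) (some (index + l)))
          (PySem.Str.slice src (some startPos) (some (index + l - 1))) then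
        (PySem.Str.rfindFrom src (PySem.Str.slice src (some index) (some (index + l)))
          startPos (some (index + l - 1)), l)
      else crlWhileA src index startPos fuel (l - 1)
    else (-1, 0)

def crl (index : Int) (src : String) (maxOffset : Int) (maxLength : Int) : Int × Int :=
  let srcSize : Int := PySem.Str.len src
  if index > srcSize then (-1, 0)
  else
    let maxLength := if index + maxLength > srcSize then srcSize - index else maxLength
    let startPos : Int := max 0 (index - maxOffset)
    let _endPos : Int := index + maxLength - 1   -- computed by A, used only in commented-out logging
    crlWhileA src index startPos maxLength.toNat maxLength

-- ===== PORT B =====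
-- ok(l) = src[index:index+l] in src[startPos:index+l-1]
def okB (src : String) (index startPos : Int) (l : Int) : Bool :=
  PySem.Str.isIn (PySem.Str.slice src (some index) (some (index + l)))
    (PySem.Str.slice src (some startPos) (some (index + l - 1)))

-- while lo < hi: mid = (lo+hi+1)//2; if ok(mid): lo = mid else hi = mid - 1
-- (fuel = hi - lo on entry; the gap shrinks by at least 1 per iteration, so the structural
-- recursion runs the while loop to completion)
def bsearchB (src : String) (index startPos : Int) : Nat → Int → Int → Int
  | 0, lo, _ => lo
  | Nat.succ fuel, lo, hi =>
    if lo < hi then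
      let mid := PySem.Int.floordiv (lo + hi + 1) 2
      if okB src index startPos mid then bsearchB src index startPos fuel mid hi
      else bsearchB src index startPos fuel lo (mid - 1)
    else lo

def crl_alt (index : Int) (src : String) (maxOffset : Int) (maxLength : Int) : Int × Int :=
  let srcSize : Int := PySem.Str.len src
  if index > srcSize then (-1, 0)
  else
    let maxLength := if index + maxLength > srcSize then srcSize - index else maxLength
    let startPos : Int := max 0 (index - maxOffset)
    if maxLength < 2 || !okB src index startPos 2 then (-1, 0)
    else
      let lo := bsearchB src index startPos (maxLength - 2).toNat 2 maxLength
      (PySem.Str.rfindFrom src (PySem.Str.slice src (some index) (some (index + lo)))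
        startPos (some (index + lo - 1)), lo)

-- ===== PRECONDITION & SPEC =====
-- Pre_ excludes negative index, outside the function's natural domain (index is a position into
-- src): there Python's negative-slice wraparound makes A return accidental run lengths that can
-- exceed the string itself (A(-3,'aa',2,3) = (1,3)).
def Pre_crl (index : Int) (src : String) (maxOffset : Int) (maxLength : Int) : Prop := 0 ≤ index
instance (index : Int) (src : String) (maxOffset : Int) (maxLength : Int) : Decidable (Pre_crl index src maxOffset maxLength) := by unfold Pre_crl; infer_instance

def pvWitness_crl : Int × String × Int × Int := (2, "aaaa", 4, 2)

def Spec_crl (index : Int) (src : String) (maxOffset : Int) (maxLength : Int) (out : Int × Int) : Prop := out = crl_alt index src maxOffset maxLength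
instance (index : Int) (src : String) (maxOffset : Int) (maxLength : Int) (out : Int × Int) : Decidable (Spec_crl index src maxOffset maxLength out) := by unfold Spec_crl; infer_instance

-- ===== CLAIM (what is proved, stated in full; the proofs are below) =====
def Claim_equal_crl : Prop := ∀ (index : Int) (src : String) (maxOffset : Int) (maxLength : Int), Dom_crl index src maxOffset maxLength → Pre_crl index src maxOffset maxLength → Spec_crl index src maxOffset maxLength (crl index src maxOffset maxLength)

-- ===== LEMMAS AND PROOFS =====

theorem occ_char (s : List Char) (i sp lN : Nat) (h2 : 2 ≤ lN) (hn : i + lN ≤ s.length) :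
    ((s.drop i).take lN <:+: (s.drop sp).take (i + lN - 1 - sp)) ↔
      ∃ p, sp ≤ p ∧ p + 1 ≤ i ∧ (s.drop i).take lN <+: s.drop p := by
  have hsub : ((s.drop i).take lN).length = lN := by
    simp [List.length_take, List.length_drop]; omega
  constructor
  · rintro ⟨t₁, t₂, h⟩
    refine ⟨sp + t₁.length, Nat.le_add_right _ _, ?_, ?_⟩
    · -- length bookkeeping
      have hlen := congrArg List.length h
      simp [List.length_append, hsub, List.length_take, List.length_drop] at hlen
      omega
    · have hpre : (s.drop i).take lN <+: ((s.drop sp).take (i + lN - 1 - sp)).drop t₁.length := by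
        rw [← h, List.append_assoc, List.drop_left]
        exact ⟨t₂, rfl⟩
      rw [List.drop_take, List.drop_drop] at hpre
      exact hpre.trans (List.take_prefix _ _)
  · rintro ⟨p, hsp, hpi, hpre⟩
    have hsubeq : (s.drop i).take lN = (s.drop p).take lN := by
      rw [List.prefix_iff_eq_take] at hpre
      rw [hpre, hsub]
    have hseg : (s.drop i).take lN = (((s.drop sp).take (i + lN - 1 - sp)).drop (p - sp)).take lN := by
      rw [List.drop_take, List.drop_drop]
      have h1 : sp + (p - sp) = p := by omega
      rw [h1, List.take_take]
      have h2' : min lN (i + lN - 1 - sp - (p - sp)) = lN := by omega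
      rw [h2', hsubeq]
    rw [hseg]
    exact ((List.take_prefix _ _).isInfix).trans ((List.drop_suffix _ _).isInfix)

theorem okB_iff (src : String) (index startPos l : Int)
    (hi : 0 ≤ index) (hsp : 0 ≤ startPos) (h2 : 2 ≤ l)
    (hn : index + l ≤ (src.toList.length : Int)) :
    okB src index startPos l = true ↔
      ∃ p, startPos.toNat ≤ p ∧ p + 1 ≤ index.toNat ∧
        (src.toList.drop index.toNat).take l.toNat <+: src.toList.drop p := by
  simp only [okB, PySem.Str.isIn, PySem.Str.slice, String.toList_ofList, PySem.Chars.slice]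
  rw [PySem.Chars.isIn_iff_infix]
  rw [PySem.List.slice_toNat _ hi (by omega), PySem.List.slice_toNat _ hsp (by omega)]
  have e1 : (index + l).toNat - index.toNat = l.toNat := by omega
  have e2 : (index + l - 1).toNat - startPos.toNat = index.toNat + l.toNat - 1 - startPos.toNat := by omega
  rw [e1, e2]
  exact occ_char _ _ _ _ (by omega) (by omega)

theorem okB_mono (src : String) (index startPos l l' : Int)
    (hi : 0 ≤ index) (hsp : 0 ≤ startPos) (h2 : 2 ≤ l') (hll : l' ≤ l)
    (hn : index + l ≤ (src.toList.length : Int)) :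
    okB src index startPos l = true → okB src index startPos l' = true := by
  intro h
  rw [okB_iff src index startPos l hi hsp (by omega) hn] at h
  rw [okB_iff src index startPos l' hi hsp h2 (by omega)]
  obtain ⟨p, h1, h2', h3⟩ := h
  refine ⟨p, h1, h2', ?_⟩
  have : (src.toList.drop index.toNat).take l'.toNat =
      ((src.toList.drop index.toNat).take l.toNat).take l'.toNat := by
    rw [List.take_take]
    congr 1
    omega
  rw [this]
  exact (List.take_prefix _ _).trans h3

-- A's descending loop returns the GREATEST feasible length (and the rfind there), no matter what
theorem loopA_eq (src : String) (index startPos : Int) : ∀ (fuel : Nat) (l : Int), l.toNat ≤ fuel →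
    crlWhileA src index startPos fuel l =
      (if Nat.findGreatest (fun k => 2 ≤ k ∧ okB src index startPos (k : Int) = true) l.toNat = 0
       then (-1, 0)
       else
        let L : Int := (Nat.findGreatest (fun k => 2 ≤ k ∧ okB src index startPos (k : Int) = true) l.toNat : Int)
        (PySem.Str.rfindFrom src (PySem.Str.slice src (some index) (some (index + L)))
          startPos (some (index + L - 1)), L)) := by
  intro fuel
  induction fuel with
  | zero =>
    intro l hl
    have hl0 : l.toNat = 0 := by omega
    rw [hl0]
    simp [crlWhileA, Nat.findGreatest]
  | succ fuel ih =>
    intro l hl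
    rw [crlWhileA]
    by_cases h1 : 1 < l
    · rw [if_pos h1]
      rw [show (PySem.Str.isIn (PySem.Str.slice src (some index) (some (index + l)))
        (PySem.Str.slice src (some startPos) (some (index + l - 1)))) = okB src index startPos l from rfl]
      have hcast : ((l.toNat : Int)) = l := by omega
      by_cases hok : okB src index startPos l = true
      · rw [if_pos hok]
        have hP : 2 ≤ l.toNat ∧ okB src index startPos ((l.toNat : Nat) : Int) = true := by
          constructor
          · omega
          · rw [hcast]; exact hok
        have hge : l.toNat ≤ Nat.findGreatest (fun k => 2 ≤ k ∧ okB src index startPos (k : Int) = true) l.toNat :=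
          Nat.le_findGreatest le_rfl hP
        have hle := Nat.findGreatest_le (P := fun k => 2 ≤ k ∧ okB src index startPos (k : Int) = true) l.toNat
        have heq : Nat.findGreatest (fun k => 2 ≤ k ∧ okB src index startPos (k : Int) = true) l.toNat = l.toNat := by omega
        rw [heq, if_neg (by omega)]
        simp only [hcast]
      · rw [if_neg hok]
        have hstep : l.toNat = (l - 1).toNat + 1 := by omega
        have hP1 : ¬(2 ≤ (l - 1).toNat + 1 ∧ okB src index startPos (((l - 1).toNat + 1 : Nat) : Int) = true) := by
          intro ⟨_, hc⟩
          rw [show (((l - 1).toNat + 1 : Nat) : Int) = l by omega] at hc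
          exact hok hc
        rw [ih (l - 1) (by omega), hstep, Nat.findGreatest_succ, if_neg hP1]
    · rw [if_neg h1]
      have : Nat.findGreatest (fun k => 2 ≤ k ∧ okB src index startPos (k : Int) = true) l.toNat = 0 := by
        rw [Nat.findGreatest_eq_zero_iff]
        intro k hk0 hkl hP
        omega
      rw [this, if_pos rfl]

-- At loop exit (lo = hi) the invariants pin lo to the greatest feasible length
theorem bsearch_final (src : String) (index startPos mL : Int) (lo : Int)
    (hlo : 2 ≤ lo) (hhi : lo ≤ mL)
    (hok : okB src index startPos lo = true)
    (habove : ∀ l : Int, lo < l → l ≤ mL → okB src index startPos l = false) :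
    lo = (Nat.findGreatest (fun k => 2 ≤ k ∧ okB src index startPos (k : Int) = true) mL.toNat : Int) := by
  have hcast : ((lo.toNat : Int)) = lo := by omega
  have hPlo : 2 ≤ lo.toNat ∧ okB src index startPos ((lo.toNat : Nat) : Int) = true := by
    refine ⟨by omega, ?_⟩
    rw [hcast]; exact hok
  have h1 : lo.toNat ≤ Nat.findGreatest (fun k => 2 ≤ k ∧ okB src index startPos (k : Int) = true) mL.toNat :=
    Nat.le_findGreatest (by omega) hPlo
  have h2 : Nat.findGreatest (fun k => 2 ≤ k ∧ okB src index startPos (k : Int) = true) mL.toNat ≤ lo.toNat := by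
    by_contra hgt
    rw [not_le] at hgt
    have hspec : 2 ≤ Nat.findGreatest (fun k => 2 ≤ k ∧ okB src index startPos (k : Int) = true) mL.toNat ∧
        okB src index startPos ((Nat.findGreatest (fun k => 2 ≤ k ∧ okB src index startPos (k : Int) = true) mL.toNat : Nat) : Int) = true :=
      Nat.findGreatest_spec (P := fun k => 2 ≤ k ∧ okB src index startPos (k : Int) = true) (m := lo.toNat) (n := mL.toNat) (by omega) hPlo
    have hlemL := Nat.findGreatest_le (P := fun k => 2 ≤ k ∧ okB src index startPos (k : Int) = true) mL.toNat
    have hfalse := habove ((Nat.findGreatest (fun k => 2 ≤ k ∧ okB src index startPos (k : Int) = true) mL.toNat : Nat) : Int) (by omega) (by omega)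
    rw [hspec.2] at hfalse
    exact Bool.noConfusion hfalse
  omega

-- B's binary search returns the same greatest feasible length, given monotonicity
theorem bsearch_eq (src : String) (index startPos mL : Int)
    (hmono : ∀ l l' : Int, 2 ≤ l' → l' ≤ l → l ≤ mL →
       okB src index startPos l = true → okB src index startPos l' = true) :
    ∀ (fuel : Nat) (lo hi : Int), (hi - lo).toNat ≤ fuel → 2 ≤ lo → lo ≤ hi → hi ≤ mL →
    okB src index startPos lo = true →
    (∀ l : Int, hi < l → l ≤ mL → okB src index startPos l = false) →
    bsearchB src index startPos fuel lo hi =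
      (Nat.findGreatest (fun k => 2 ≤ k ∧ okB src index startPos (k : Int) = true) mL.toNat : Int) := by
  intro fuel
  induction fuel with
  | zero =>
    intro lo hi hn hlo hlohi hhi hok habove
    have hequ : lo = hi := by omega
    subst hequ
    exact bsearch_final src index startPos mL lo hlo (by omega) hok habove
  | succ fuel ih =>
    intro lo hi hn hlo hlohi hhi hok habove
    rw [bsearchB]
    by_cases hlt : lo < hi
    · rw [if_pos hlt]
      have hmid : lo < PySem.Int.floordiv (lo + hi + 1) 2 ∧ PySem.Int.floordiv (lo + hi + 1) 2 ≤ hi := by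
        simp only [PySem.Int.floordiv]
        rw [Int.fdiv_eq_ediv]
        omega
      set mid := PySem.Int.floordiv (lo + hi + 1) 2 with hmiddef
      by_cases hokm : okB src index startPos mid = true
      · rw [if_pos hokm]
        exact ih mid hi (by omega) (by omega) (by omega) hhi hokm habove
      · rw [if_neg hokm]
        refine ih lo (mid - 1) (by omega) hlo (by omega) (by omega) hok ?_
        intro l h1 h2
        cases h : okB src index startPos l with
        | false => rfl
        | true =>
          exact absurd (hmono l mid (by omega) (by omega) h2 h) hokm
    · rw [if_neg hlt]
      have hequ : lo = hi := by omega
      subst hequ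
      exact bsearch_final src index startPos mL lo hlo (by omega) hok habove

-- ===== VERDICT (by name: the statement is the Claim_ definition above) =====
theorem crl_spec : Claim_equal_crl := by
  intro index src maxOffset maxLength _ hpre
  unfold Spec_crl crl crl_alt
  simp only [PySem.Str.len_eq]
  by_cases hbig : index > (src.toList.length : Int)
  · rw [if_pos hbig, if_pos hbig]
  · rw [if_neg hbig, if_neg hbig]
    set n : Int := (src.toList.length : Int) with hn
    set mL : Int := if index + maxLength > n then n - index else maxLength with hmL
    set sp : Int := max 0 (index - maxOffset) with hsp
    have hspp : 0 ≤ sp := le_max_left _ _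
    have hmln : index + mL ≤ n := by rw [hmL]; split <;> omega
    have hpre' : 0 ≤ index := hpre
    have hmono : ∀ l l' : Int, 2 ≤ l' → l' ≤ l → l ≤ mL →
        okB src index sp l = true → okB src index sp l' = true := by
      intro l l' h2 hll hlm
      exact okB_mono src index sp l l' hpre' hspp h2 hll (by omega)
    rw [loopA_eq src index sp mL.toNat mL le_rfl]
    by_cases hml2 : mL < 2
    · have hcond : (decide (mL < 2) || !okB src index sp 2) = true := by
        simp [hml2]
      rw [if_pos hcond]
      have hfg : Nat.findGreatest (fun k => 2 ≤ k ∧ okB src index sp (k : Int) = true) mL.toNat = 0 := by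
        rw [Nat.findGreatest_eq_zero_iff]
        intro k hk0 hkl hP
        omega
      rw [hfg, if_pos rfl]
    · by_cases hok2 : okB src index sp 2 = true
      · have hcond : (decide (mL < 2) || !okB src index sp 2) = false := by
          simp [hml2, hok2]
        have hcond' : ¬((decide (mL < 2) || !okB src index sp 2) = true) := by
          rw [hcond]; exact Bool.false_ne_true
        rw [if_neg hcond']
        have hab : ∀ l : Int, mL < l → l ≤ mL → okB src index sp l = false := by
          intro l h1 h2
          omega
        rw [bsearch_eq src index sp mL hmono (mL - 2).toNat 2 mL le_rfl le_rfl (by omega) le_rfl hok2 hab]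
        have hP2 : 2 ≤ (2 : Nat) ∧ okB src index sp ((2 : Nat) : Int) = true := by
          refine ⟨le_rfl, ?_⟩
          rw [show (((2 : Nat)) : Int) = (2 : Int) by norm_num]
          exact hok2
        have hge : (2 : Nat) ≤ Nat.findGreatest (fun k => 2 ≤ k ∧ okB src index sp (k : Int) = true) mL.toNat :=
          Nat.le_findGreatest (by omega) hP2
        have hfgne : ¬(Nat.findGreatest (fun k => 2 ≤ k ∧ okB src index sp (k : Int) = true) mL.toNat = 0) := by
          omega
        rw [if_neg hfgne]
      · have hcond : (decide (mL < 2) || !okB src index sp 2) = true := by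
          simp [hok2]
        rw [if_pos hcond]
        have hfg : Nat.findGreatest (fun k => 2 ≤ k ∧ okB src index sp (k : Int) = true) mL.toNat = 0 := by
          rw [Nat.findGreatest_eq_zero_iff]
          rintro k hk0 hkl ⟨hk2, hkok⟩
          exact hok2 (hmono (k : Int) 2 le_rfl (by omega) (by omega) hkok)
        rw [hfg, if_pos rfl]
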